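-- pv_equiv track=rewrite | github.com/simonolander/euler | euler-189-tri-color-triangular-grid.py | reduce_colors
-- ===== SOURCE A (Python) =====
-- def reduce_colors(colors):
--     reduced = list(colors)
--     if reduced[0] != 0:
--         color0 = reduced[0]
--         for i, color in enumerate(reduced):
--             if color == color0:
--                 reduced[i] = 0
--             elif color == 0:
--                 reduced[i] = color0
--     for i in range(1, len(reduced)):
--         color = reduced[i]
--         if color == 0:
--             continue
--         elif color == 1:
--             break
--         else:
--             for j in range(i, len(reduced)):
--                 if reduced[j] == 2:
--                     reduced[j] = 1
--                 elif reduced[j] == 1: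
--                     reduced[j] = 2
--             break
--     return reduced
-- ===== SOURCE B (Python) =====
-- def reduce_colors(colors):
--     # single left-to-right pass with an online state machine (A does staged passes)
--     c0 = colors[0]
--     out = [0]
--     swap = None  # None = undecided, False = keep 1/2, True = swap 1/2
--     for x in colors[1:]:
--         if c0 != 0:
--             y = 0 if x == c0 else (c0 if x == 0 else x)
--         else:
--             y = x
--         if swap is None and y != 0:
--             swap = (y != 1)
--         if swap and y in (1, 2):
--             y = 3 - y
--         out.append(y)
--     return out
-- ===== Notes on version B (the rewrite author's own statement) =====
-- stated objective: alternative
-- what changed: A makes up to three staged passes over a mutable copy (a global relabel loop, a scan, and a nested partial 1/2-swap loop); B is a single left-to-right pass with an online 3-state accumulator (undecided / keep / swap) that emits each output element once and never revisits the list.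
import Mathlib
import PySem

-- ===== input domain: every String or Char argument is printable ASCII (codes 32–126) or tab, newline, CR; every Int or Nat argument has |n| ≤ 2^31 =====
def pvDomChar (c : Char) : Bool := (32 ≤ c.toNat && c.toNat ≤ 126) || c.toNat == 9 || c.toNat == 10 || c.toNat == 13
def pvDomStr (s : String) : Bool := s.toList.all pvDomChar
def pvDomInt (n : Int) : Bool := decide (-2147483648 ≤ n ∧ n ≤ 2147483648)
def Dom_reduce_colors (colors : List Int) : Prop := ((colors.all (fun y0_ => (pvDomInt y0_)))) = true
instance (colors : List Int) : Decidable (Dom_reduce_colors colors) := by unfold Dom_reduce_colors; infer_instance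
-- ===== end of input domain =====

-- B replaces A's staged mutation passes by a single left-to-right pass with an online state machine (objective: alternative).

-- ===== PORT A =====
-- first pass: 'for i, color in enumerate(reduced): if color == color0: reduced[i] = 0 elif color == 0: reduced[i] = color0'
def aPass1 (color0 : Int) (red : List Int) (i : Nat) : List Int :=
  if h : i < red.length then
    let color := red[i]
    if color = color0 then aPass1 color0 (red.set i 0) (i+1)
    else if color = 0 then aPass1 color0 (red.set i color0) (i+1)
    else aPass1 color0 red (i+1)
  else red
termination_by red.length - i
decreasing_by all_goals first | (simp only [List.length_set]; omega) | omega

-- inner loop: 'for j in range(i, len(reduced)): if reduced[j] == 2: reduced[j] = 1 elif reduced[j] == 1: reduced[j] = 2'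
def aInner (red : List Int) (j : Nat) : List Int :=
  if h : j < red.length then
    if red[j] = 2 then aInner (red.set j 1) (j+1)
    else if red[j] = 1 then aInner (red.set j 2) (j+1)
    else aInner red (j+1)
  else red
termination_by red.length - j
decreasing_by all_goals first | (simp only [List.length_set]; omega) | omega

-- second pass: 'for i in range(1, len(reduced)): … continue / break / inner-loop-then-break'
def aScan (red : List Int) (i : Nat) : List Int :=
  if h : i < red.length then
    let color := red[i]
    if color = 0 then aScan red (i+1)
    else if color = 1 then red
    else aInner red i
  else red
termination_by red.length - i

def reduce_colors (colors : List Int) : List Int :=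
  let reduced := colors
  let reduced :=
    match PySem.List.pyGet? reduced 0 with     -- reduced[0] (IndexError on [] is excluded by Pre_)
    | none => reduced
    | some c0 => if c0 ≠ 0 then aPass1 c0 reduced 0 else reduced
  aScan reduced 1

-- ===== PORT B =====
-- the relabelling of one element ('y = 0 if x == c0 else (c0 if x == 0 else x)' when c0 != 0, else 'y = x')
def t1f (c0 : Int) (x : Int) : Int := if c0 ≠ 0 then (if x = c0 then 0 else if x = 0 then c0 else x) else x

-- one pass: state = (out so far, swap : none = undecided / some false = keep / some true = swap 1 and 2)
def bStep (c0 : Int) (st : List Int × Option Bool) (x : Int) : List Int × Option Bool :=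
  let y := t1f c0 x
  let swap := if st.2 = none ∧ y ≠ 0 then some (decide (y ≠ 1)) else st.2
  let y := if swap = some true ∧ (y = 1 ∨ y = 2) then 3 - y else y
  (st.1 ++ [y], swap)

def reduce_colors_alt (colors : List Int) : List Int :=
  match colors with
  | [] => []                                   -- colors[0] raises IndexError in Python B too; excluded by Pre_
  | c0 :: rest => (rest.foldl (bStep c0) ([0], none)).1

-- ===== PRECONDITION & SPEC =====
-- Pre_ excludes only the empty list, on which the Python A raises IndexError at reduced[0].
def Pre_reduce_colors (colors : List Int) : Prop := colors ≠ []
instance (colors : List Int) : Decidable (Pre_reduce_colors colors) := by unfold Pre_reduce_colors; infer_instance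
def pvWitness_reduce_colors : List Int := [1, 2, 0]

def Spec_reduce_colors (colors : List Int) (out : List Int) : Prop := out = reduce_colors_alt colors
instance (colors : List Int) (out : List Int) : Decidable (Spec_reduce_colors colors out) := by unfold Spec_reduce_colors; infer_instance

-- ===== CLAIM (what is proved, stated in full; the proofs are below) =====
def Claim_equal_reduce_colors : Prop := ∀ (colors : List Int), Dom_reduce_colors colors → Pre_reduce_colors colors → Spec_reduce_colors colors (reduce_colors colors)

-- ===== LEMMAS AND PROOFS =====

def f1 (c0 : Int) (x : Int) : Int := if x = c0 then 0 else if x = 0 then c0 else x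
def f2 (x : Int) : Int := if x = 2 then 1 else if x = 1 then 2 else x

lemma take_succ' (red : List Int) (i : Nat) (h : i < red.length) :
    red.take (i+1) = red.take i ++ [red[i]] := by
  rw [List.take_add_one, List.getElem?_eq_getElem (by simpa using h)]; rfl

lemma step_set (red : List Int) (i : Nat) (h : i < red.length) (v : Int) :
    (red.set i v).take (i+1) = red.take i ++ [v] := by
  rw [List.take_set, take_succ' _ _ h, List.set_append]
  simp [List.length_take, Nat.min_eq_left (Nat.le_of_lt h)]

lemma step_drop (red : List Int) (i : Nat) (v : Int) :
    (red.set i v).drop (i+1) = red.drop (i+1) := by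
  rw [List.drop_set]; simp

lemma aPass1_eq (c0 : Int) (red : List Int) (i : Nat) :
    aPass1 c0 red i = red.take i ++ (red.drop i).map (f1 c0) := by
  fun_induction aPass1 c0 red i with
  | case1 red i h color hc ih =>
    have hc' : red[i] = c0 := hc
    rw [List.drop_eq_getElem_cons h, List.map_cons, ih, step_drop, step_set _ _ h]
    simp [f1, hc']
  | case2 red i h color hc hc0 ih =>
    have hc0' : red[i] = 0 := hc0
    rw [List.drop_eq_getElem_cons h, List.map_cons, ih, step_drop, step_set _ _ h]
    simp [f1, hc0']
    omega
  | case3 red i h color hc hc0 ih =>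
    have hc' : ¬ red[i] = c0 := hc
    have hc0' : ¬ red[i] = 0 := hc0
    rw [List.drop_eq_getElem_cons h, List.map_cons, ih, take_succ' _ _ h, List.append_assoc]
    simp [f1, hc', hc0']
  | case4 red i h =>
    rw [List.drop_of_length_le (by omega), List.take_of_length_le (by omega)]; simp

lemma aInner_eq (red : List Int) (j : Nat) :
    aInner red j = red.take j ++ (red.drop j).map f2 := by
  fun_induction aInner red j with
  | case1 red j h hc ih =>
    rw [List.drop_eq_getElem_cons h, List.map_cons, ih, step_drop, step_set _ _ h]
    simp [f2, hc]
  | case2 red j h hc hc0 ih =>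
    rw [List.drop_eq_getElem_cons h, List.map_cons, ih, step_drop, step_set _ _ h]
    simp [f2, hc0]
  | case3 red j h hc hc0 ih =>
    rw [List.drop_eq_getElem_cons h, List.map_cons, ih, take_succ' _ _ h, List.append_assoc]
    simp [f2, hc, hc0]
  | case4 red j h =>
    rw [List.drop_of_length_le (by omega), List.take_of_length_le (by omega)]; simp

lemma aScan_eq (red : List Int) (i : Nat) (hz : ∀ x ∈ red.take i, x = 0) :
    aScan red i =
      match (red.drop i).find? (fun x => x != 0) with
      | none => red
      | some w => if w = 1 then red else red.map f2 := by
  revert hz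
  fun_induction aScan red i with
  | case1 i h color hc ih =>
    intro hz
    have hc' : red[i] = 0 := hc
    rw [List.drop_eq_getElem_cons h, hc']
    have hz' : ∀ x ∈ red.take (i+1), x = 0 := by
      rw [take_succ' _ _ h]
      intro x hx
      rcases List.mem_append.1 hx with h1 | h1
      · exact hz x h1
      · simpa [hc'] using h1
    rw [List.find?_cons_of_neg (by simp)]
    exact ih hz'
  | case2 i h color hc hc1 =>
    intro hz
    have hc' : ¬ red[i] = 0 := hc
    have hc1' : red[i] = 1 := hc1
    rw [List.drop_eq_getElem_cons h, List.find?_cons_of_pos (by simpa using hc')]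
    simp [hc1']
  | case3 i h color hc hc1 =>
    intro hz
    have hc' : ¬ red[i] = 0 := hc
    have hc1' : ¬ red[i] = 1 := hc1
    rw [List.drop_eq_getElem_cons h, List.find?_cons_of_pos (by simpa using hc')]
    simp only [hc1', if_false]
    rw [aInner_eq]
    have ht : (red.take i).map f2 = red.take i := by
      trans (red.take i).map id
      · exact List.map_congr_left (fun x hx => by simp [f2, hz x hx])
      · simp
    calc red.take i ++ (red.drop i).map f2
        = (red.take i).map f2 ++ (red.drop i).map f2 := by rw [ht]
      _ = red.map f2 := by rw [← List.map_append, List.take_append_drop]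
  | case4 i h =>
    intro hz
    rw [List.drop_of_length_le (by omega)]
    simp

-- how one step of the fold behaves, by cases on the state and the relabelled value
lemma bStep_some (c0 : Int) (b : Bool) (out : List Int) (y : Int) :
    bStep c0 (out, some b) y =
      (out ++ [if b = true ∧ (t1f c0 y = 1 ∨ t1f c0 y = 2) then 3 - t1f c0 y else t1f c0 y], some b) := by
  cases b <;> simp [bStep, t1f]

lemma bStep_none_zero (c0 : Int) (out : List Int) (y : Int) (h : t1f c0 y = 0) :
    bStep c0 (out, none) y = (out ++ [0], none) := by
  simp [bStep, h]

lemma bStep_none_one (c0 : Int) (out : List Int) (y : Int) (h1 : t1f c0 y = 1) :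
    bStep c0 (out, none) y = (out ++ [1], some false) := by
  simp [bStep, h1]

lemma f2_eq_swap (x : Int) : f2 x = if x = 1 ∨ x = 2 then 3 - x else x := by
  simp only [f2]; split_ifs <;> omega

lemma bStep_none_other (c0 : Int) (out : List Int) (y : Int)
    (h : t1f c0 y ≠ 0) (h1 : t1f c0 y ≠ 1) :
    bStep c0 (out, none) y = (out ++ [f2 (t1f c0 y)], some true) := by
  have hd : (decide (t1f c0 y ≠ 1)) = true := by simp [h1]
  simp only [bStep, hd]
  by_cases h2 : t1f c0 y = 2 <;> simp [f2, h, h1, h2]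

-- decided states: the fold just maps the rest (with or without the 1/2 swap)
lemma foldB_decided (c0 : Int) (b : Bool) (out : List Int) (ys : List Int) :
    (ys.foldl (bStep c0) (out, some b)).1 =
      out ++ ys.map (fun x => if b = true ∧ (t1f c0 x = 1 ∨ t1f c0 x = 2) then 3 - t1f c0 x else t1f c0 x) := by
  induction ys generalizing out with
  | nil => simp
  | cons y ys ih =>
    rw [List.foldl_cons, bStep_some, ih]
    simp

lemma foldB_decided_false (c0 : Int) (out : List Int) (ys : List Int) :
    (ys.foldl (bStep c0) (out, some false)).1 = out ++ ys.map (t1f c0) := by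
  rw [foldB_decided]; simp

lemma foldB_decided_true (c0 : Int) (out : List Int) (ys : List Int) :
    (ys.foldl (bStep c0) (out, some true)).1 = out ++ ys.map (fun x => f2 (t1f c0 x)) := by
  rw [foldB_decided]
  congr 1
  exact List.map_congr_left (fun x _ => by rw [f2_eq_swap]; simp)

-- undecided state: the fold's result, characterised by the first nonzero relabelled value
lemma foldB_none (c0 : Int) (out : List Int) (ys : List Int) :
    (ys.foldl (bStep c0) (out, none)).1 =
      match (ys.map (t1f c0)).find? (fun x => x != 0) with
      | none => out ++ ys.map (t1f c0)
      | some w => if w = 1 then out ++ ys.map (t1f c0)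
                  else out ++ ys.map (fun x => f2 (t1f c0 x)) := by
  induction ys generalizing out with
  | nil => simp
  | cons y ys ih =>
    simp only [List.foldl_cons, List.map_cons]
    by_cases hy : t1f c0 y = 0
    · rw [bStep_none_zero _ _ _ hy, ih, List.find?_cons_of_neg (by simp [hy]), hy]
      rcases (ys.map (t1f c0)).find? (fun x => x != 0) with _ | w
      · simp
      · by_cases hw : w = 1 <;> simp [hw, f2]
    · rw [List.find?_cons_of_pos (by simpa using hy)]
      by_cases h1 : t1f c0 y = 1
      · rw [bStep_none_one _ _ _ h1, foldB_decided_false, h1]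
        simp
      · rw [bStep_none_other _ _ _ hy h1, foldB_decided_true]
        simp [h1]

-- ===== VERDICT (by name: the statement is the Claim_ definition above) =====
theorem reduce_colors_spec : Claim_equal_reduce_colors := by
  intro colors _ hpre
  unfold Spec_reduce_colors
  cases colors with
  | nil => exact absurd rfl hpre
  | cons c0 rest =>
    unfold reduce_colors reduce_colors_alt
    have hget : PySem.List.pyGet? (c0 :: rest) (0 : Int) = some c0 := by
      simp [PySem.List.pyGet?, PySem.List.pyIdx?]
    simp only [hget]
    have hred : (if c0 ≠ 0 then aPass1 c0 (c0 :: rest) 0 else (c0 :: rest)) = (c0 :: rest).map (t1f c0) := by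
      by_cases h0 : c0 = 0
      · rw [if_neg (fun hc => hc h0)]
        calc (c0 :: rest) = (c0 :: rest).map id := by simp
          _ = (c0 :: rest).map (t1f c0) := List.map_congr_left (fun x _ => by simp [t1f, h0])
      · rw [if_pos h0, aPass1_eq]
        simp only [List.take_zero, List.drop_zero, List.nil_append]
        exact List.map_congr_left (fun x _ => by simp [f1, t1f, h0])
    simp only [hred]
    have ht1c0 : t1f c0 c0 = 0 := by by_cases h0 : c0 = 0 <;> simp [t1f, h0]
    have hmap : (c0 :: rest).map (t1f c0) = 0 :: rest.map (t1f c0) := by simp [ht1c0]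
    have hz : ∀ x ∈ ((c0 :: rest).map (t1f c0)).take 1, x = 0 := by
      rw [hmap]; intro x hx; simpa using hx
    rw [aScan_eq _ _ hz, foldB_none]
    have hdrop : ((c0 :: rest).map (t1f c0)).drop 1 = rest.map (t1f c0) := by simp
    rw [hdrop, hmap]
    rcases hfind : (rest.map (t1f c0)).find? (fun x => x != 0) with _ | w
    · simp
    · by_cases hw : w = 1
      · simp [hw]
      · simp only [hw, if_false]
        simp [f2, List.map_map, Function.comp]
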